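-- pv_equiv track=rewrite | github.com/sayayangnu/ner_eval | lab_liz.py | get_sents
-- ===== SOURCE A (Python) =====
-- def get_sents(lines):
--     """
--     Args:
--         lines (Iterable[str]): the lines
--
--     Yields:
--         List[str]: sentences as list
--     """
--     sents = []
--     sent = []
--     stripped_lines = (line.strip() for line in lines)
--     for line in stripped_lines:
--         if line == '':
--             sents.append(sent)
--             sent = []
--         else:
--             sent.append(line)
--     sents.append(sent)
--     return sents
-- ===== SOURCE B (Python) =====
-- def get_sents(lines):
--     stripped = [line.strip() for line in lines]
--     boundaries = [i for i, s in enumerate(stripped) if s == '']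
--     sents = []
--     start = 0
--     for b in boundaries:
--         sents.append(stripped[start:b])
--         start = b + 1
--     sents.append(stripped[start:])
--     return sents
-- ===== Notes on version B (the rewrite author's own statement) =====
-- stated objective: alternative
-- what changed: B materializes the stripped lines once, collects the indices of blank lines, and builds each sentence by slicing between consecutive blank-line boundaries, instead of A's incremental line-by-line accumulation into a current-sentence buffer.
import Mathlib
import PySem

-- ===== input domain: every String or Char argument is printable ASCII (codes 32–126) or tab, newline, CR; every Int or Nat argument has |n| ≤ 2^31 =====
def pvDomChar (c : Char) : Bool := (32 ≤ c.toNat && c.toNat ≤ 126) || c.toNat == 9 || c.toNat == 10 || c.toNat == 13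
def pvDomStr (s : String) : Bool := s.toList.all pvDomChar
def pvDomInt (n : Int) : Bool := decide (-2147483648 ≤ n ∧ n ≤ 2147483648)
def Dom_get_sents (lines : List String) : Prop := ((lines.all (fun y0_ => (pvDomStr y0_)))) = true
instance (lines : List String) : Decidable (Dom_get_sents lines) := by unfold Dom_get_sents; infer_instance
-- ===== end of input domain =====

-- B groups the stripped lines by slicing between blank-line boundary indices instead of
-- A's incremental accumulation; objective: alternative decomposition, same cost.

-- ===== PORT A =====
-- the body of A's for-loop (append current sentence on blank line, else extend it)
def stepA (p : List (List String) × List String) (line : String) :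
    List (List String) × List String :=
  if line = "" then (p.1 ++ [p.2], ([] : List String)) else (p.1, p.2 ++ [line])

def get_sents (lines : List String) : List (List String) :=
  let stripped := lines.map (fun line => PySem.Str.strip line)
  let p := stripped.foldl stepA ([], [])
  p.1 ++ [p.2]

-- ===== PORT B =====
-- the body of B's for-loop over boundary indices (emit slice, advance start past boundary)
def stepB (stripped : List String) (q : List (List String) × Int) (b : Int) :
    List (List String) × Int :=
  (q.1 ++ [PySem.List.slice stripped (some q.2) (some b)], b + 1)

def get_sents_alt (lines : List String) : List (List String) :=
  let stripped := lines.map (fun line => PySem.Str.strip line)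
  let boundaries := ((PySem.List.enumerate stripped 0).filter (fun q => q.2 == "")).map (·.1)
  let r := boundaries.foldl (stepB stripped) ([], 0)
  r.1 ++ [PySem.List.slice stripped (some r.2) none]

-- ===== PRECONDITION & SPEC =====
def Spec_get_sents (lines : List String) (out : List (List String)) : Prop := out = get_sents_alt lines
instance (lines : List String) (out : List (List String)) : Decidable (Spec_get_sents lines out) := by unfold Spec_get_sents; infer_instance

-- ===== CLAIM (what is proved, stated in full; the proofs are below) =====
def Claim_equal_get_sents : Prop := ∀ (lines : List String), Dom_get_sents lines → Spec_get_sents lines (get_sents lines)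

-- ===== LEMMAS AND PROOFS =====

-- reference splitter: group a list of (already stripped) lines on the empty strings
def refSplit : List String → List (List String)
  | [] => [[]]
  | x :: t =>
    if x = "" then [] :: refSplit t
    else match refSplit t with
      | [] => [[x]]
      | g :: gs => (x :: g) :: gs

-- indices (as Int, offset by the Nat start) of the blank lines
def bidx : List String → Nat → List Int
  | [], _ => []
  | x :: t, i => if x = "" then (i : Int) :: bidx t (i + 1) else bidx t (i + 1)

-- B's loop plus the final slice, as one function of the start index and boundary list
def bfin (s : List String) (j : Int) (bs : List Int) : List (List String) :=
  let r := bs.foldl (stepB s) ([], j)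
  r.1 ++ [PySem.List.slice s (some r.2) none]

theorem refSplit_ne_nil (s : List String) : refSplit s ≠ [] := by
  cases s with
  | nil => simp [refSplit]
  | cons x t =>
    simp only [refSplit]
    split
    · simp
    · cases h : refSplit t <;> simp

theorem aLoop (s : List String) (acc : List (List String)) (cur : List String) :
    (s.foldl stepA (acc, cur)).1 ++ [(s.foldl stepA (acc, cur)).2]
      = acc ++ (match refSplit s with | [] => [cur] | g :: gs => (cur ++ g) :: gs) := by
  induction s generalizing acc cur with
  | nil => simp [refSplit]
  | cons x t ih =>
    by_cases hx : x = ""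
    · simp only [List.foldl_cons, stepA, if_pos hx, refSplit, ih]
      cases h : refSplit t with
      | nil => exact absurd h (refSplit_ne_nil t)
      | cons g gs => simp
    · simp only [List.foldl_cons, stepA, if_neg hx, refSplit, ih]
      cases h : refSplit t with
      | nil => exact absurd h (refSplit_ne_nil t)
      | cons g gs => simp

theorem boundaries_eq (s : List String) (n : Nat) :
    (((PySem.List.enumerate s (n : Int)).filter (fun q => q.2 == "")).map (·.1)) = bidx s n := by
  induction s generalizing n with
  | nil => simp [PySem.List.enumerate, bidx]
  | cons x t ih =>
    have hcast : ((n : Int) + 1) = ((n + 1 : Nat) : Int) := by push_cast; ring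
    rw [PySem.List.enumerate_cons, List.filter_cons, hcast]
    by_cases hx : x = ""
    · subst hx
      simp only [bidx, beq_self_eq_true, if_true, List.map_cons, ih]
    · rw [if_neg (by simpa using hx)]
      simp only [bidx, if_neg hx]
      exact ih (n + 1)

theorem foldB_factor (s : List String) (bs : List Int) (acc : List (List String)) (j : Int) :
    bs.foldl (stepB s) (acc, j)
      = (acc ++ (bs.foldl (stepB s) ([], j)).1, (bs.foldl (stepB s) ([], j)).2) := by
  induction bs generalizing acc j with
  | nil => simp
  | cons b bs ih =>
    simp only [List.foldl_cons, stepB, List.nil_append]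
    rw [ih, ih [PySem.List.slice s (some j) (some b)]]
    simp

theorem bfin_cons (s : List String) (j b : Int) (bs : List Int) :
    bfin s j (b :: bs) = PySem.List.slice s (some j) (some b) :: bfin s (b + 1) bs := by
  simp only [bfin, List.foldl_cons, stepB, List.nil_append]
  rw [foldB_factor s bs [PySem.List.slice s (some j) (some b)]]
  simp

theorem bidx_lb (t : List String) (j : Nat) (b : Int) (hb : b ∈ bidx t j) : (j : Int) ≤ b := by
  induction t generalizing j with
  | nil => simp [bidx] at hb
  | cons x t ih =>
    simp only [bidx] at hb
    split at hb
    · rcases List.mem_cons.mp hb with h | h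
      · omega
      · have := ih (j + 1) h; push_cast at this; omega
    · have := ih (j + 1) hb; push_cast at this; omega

theorem slice_cons_of_drop (s : List String) (x : String) (t : List String) (i : Nat) (b : Int)
    (h : s.drop i = x :: t) (hib : (i : Int) < b) :
    PySem.List.slice s (some (i : Int)) (some b) = x :: PySem.List.slice s (some ((i : Int) + 1)) (some b) := by
  have hb0 : 0 ≤ b := by omega
  have ht : s.drop (i + 1) = t := by
    rw [← List.drop_drop, h]; rfl
  have h1 : ((i : Int) + 1) = ((i + 1 : Nat) : Int) := by push_cast; ring
  obtain ⟨k, hk⟩ : ∃ k : Nat, b = (k : Int) := ⟨b.toNat, by omega⟩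
  subst hk
  rw [h1, PySem.List.slice_natCast, PySem.List.slice_natCast, h, ht]
  have hik : i < k := by exact_mod_cast hib
  have : k - i = (k - (i + 1)) + 1 := by omega
  rw [this, List.take_succ_cons]

theorem bfin_consHead (s : List String) (x : String) (t : List String) (i : Nat)
    (h : s.drop i = x :: t) (bs : List Int) (hbs : ∀ b ∈ bs, (i : Int) < b) :
    bfin s (i : Int) bs
      = (match bfin s ((i : Int) + 1) bs with | [] => [[x]] | g :: gs => (x :: g) :: gs) := by
  cases bs with
  | nil =>
    have h1 : ((i : Int) + 1) = ((i + 1 : Nat) : Int) := by push_cast; ring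
    have ht : s.drop (i + 1) = t := by rw [← List.drop_drop, h]; rfl
    simp only [bfin, List.foldl_nil, h1, PySem.List.slice_from_natCast, h, ht]
    simp
  | cons b bs' =>
    have hb : (i : Int) < b := hbs b (List.mem_cons_self ..)
    rw [bfin_cons, bfin_cons, slice_cons_of_drop s x t i b h hb]

theorem bLoop (s : List String) (t : List String) (i : Nat) (h : s.drop i = t) :
    bfin s (i : Int) (bidx t i) = refSplit t := by
  induction t generalizing i with
  | nil =>
    simp only [bfin, bidx, List.foldl_nil, PySem.List.slice_from_natCast, h, refSplit]
    rfl
  | cons x t ih =>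
    have ht : s.drop (i + 1) = t := by rw [← List.drop_drop, h]; rfl
    have h1 : ((i : Int) + 1) = ((i + 1 : Nat) : Int) := by push_cast; ring
    by_cases hx : x = ""
    · simp only [bidx, if_pos hx]
      rw [bfin_cons]
      have hslice : PySem.List.slice s (some (i : Int)) (some (i : Int)) = [] := by
        rw [PySem.List.slice_natCast]; simp
      rw [hslice, h1, ih (i + 1) ht]
      simp [refSplit, hx]
    · simp only [bidx, if_neg hx]
      rw [bfin_consHead s x t i h _ (fun b hb => by
            have := bidx_lb t (i + 1) b hb; push_cast at this; omega)]
      rw [h1, ih (i + 1) ht]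
      simp only [refSplit, if_neg hx]

theorem get_sents_eq_refSplit (lines : List String) :
    get_sents lines = refSplit (lines.map (fun line => PySem.Str.strip line)) := by
  unfold get_sents
  rw [aLoop]
  cases h : refSplit (lines.map (fun line => PySem.Str.strip line)) with
  | nil => exact absurd h (refSplit_ne_nil _)
  | cons g gs => simp

theorem get_sents_alt_eq_refSplit (lines : List String) :
    get_sents_alt lines = refSplit (lines.map (fun line => PySem.Str.strip line)) := by
  have e : get_sents_alt lines
      = bfin (lines.map (fun line => PySem.Str.strip line)) (((0 : Nat) : Int))
          (((PySem.List.enumerate (lines.map (fun line => PySem.Str.strip line)) ((0 : Nat) : Int)).filter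
              (fun q => q.2 == "")).map (·.1)) := rfl
  rw [e, boundaries_eq]
  exact bLoop _ _ 0 rfl

-- ===== VERDICT (by name: the statement is the Claim_ definition above) =====
theorem get_sents_spec : Claim_equal_get_sents := by
  intro lines _
  unfold Spec_get_sents
  rw [get_sents_eq_refSplit, get_sents_alt_eq_refSplit]
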